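-- pv_equiv track=rewrite | github.com/zuquan-song/leetcode | python/vmware/even_subarray.py | even_subarray
-- ===== SOURCE A (Python) =====
-- def even_subarray(array, k):
--     res = []
--     n = len(array)
--     for i in range(n):
--         odd = 0
--         for j in range(i, n):
--             if array[j] % 2:
--                 odd += 1
--             if odd <= k:
--                 res.append(array[i:j+1])
--     return res
-- ===== SOURCE B (Python) =====
-- def even_subarray(array, k):
--     n = len(array)
--     pref = [0]
--     for x in array:
--         pref.append(pref[-1] + x % 2)
--     res = []
--     for i in range(n):
--         lo, hi = i, n + 1
--         target = pref[i] + k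
--         while lo < hi:
--             mid = (lo + hi) // 2
--             if pref[mid] <= target:
--                 lo = mid + 1
--             else:
--                 hi = mid
--         for m in range(i + 1, lo):
--             res.append(array[i:m])
--     return res
-- ===== Notes on version B (the rewrite author's own statement) =====
-- stated objective: alternative
-- what changed: A counts odd elements element-by-element in a nested loop over every (i,j) pair; B precomputes a prefix odd-count table once and, for each start i, binary-searches the monotone table for the last valid end index, then emits the slices of that range directly.
import Mathlib
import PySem

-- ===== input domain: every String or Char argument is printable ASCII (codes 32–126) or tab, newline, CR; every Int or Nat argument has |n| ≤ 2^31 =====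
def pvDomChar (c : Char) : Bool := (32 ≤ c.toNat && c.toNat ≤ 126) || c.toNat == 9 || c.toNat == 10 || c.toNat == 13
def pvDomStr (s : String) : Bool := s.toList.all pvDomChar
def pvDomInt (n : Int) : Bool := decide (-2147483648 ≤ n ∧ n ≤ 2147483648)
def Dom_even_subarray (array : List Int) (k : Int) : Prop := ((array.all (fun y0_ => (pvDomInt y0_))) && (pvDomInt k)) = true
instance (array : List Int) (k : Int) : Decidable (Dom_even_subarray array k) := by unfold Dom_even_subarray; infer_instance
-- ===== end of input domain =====

-- B replaces A's per-start odd-counting inner loop by a prefix odd-count table plus a binary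
-- search for the emission boundary (objective: alternative decomposition; same output proved below).

-- ===== PORT A =====
def even_subarray (array : List Int) (k : Int) : List (List Int) :=
  let n : Int := (array.length : Int)
  (PySem.List.pyRange 0 n 1).foldl
    (fun res i =>
      ((PySem.List.pyRange i n 1).foldl
        (fun (st : List (List Int) × Int) j =>
          let odd : Int := if PySem.Int.mod (PySem.List.pyGetD array j 0) 2 ≠ 0 then st.2 + 1 else st.2
          (if odd ≤ k then st.1 ++ [PySem.List.slice array (some i) (some (j + 1))] else st.1, odd))
        (res, 0)).1)
    []

-- ===== PORT B =====
-- the while loop `while lo < hi: mid = (lo+hi)//2; if pref[mid] <= target: lo = mid+1 else: hi = mid`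
-- (the local `mid` is inlined here, value-identically)
def esBS (pref : List Int) (target lo hi : Int) : Int :=
  if h : lo < hi then
    if PySem.List.pyGetD pref (PySem.Int.floordiv (lo + hi) 2) 0 ≤ target then
      esBS pref target (PySem.Int.floordiv (lo + hi) 2 + 1) hi
    else esBS pref target lo (PySem.Int.floordiv (lo + hi) 2)
  else lo
termination_by (hi - lo).toNat
decreasing_by
  all_goals
    have hb := PySem.Int.floordiv_two_mid_bounds (le_of_lt h)
    have hlt : PySem.Int.floordiv (lo + hi) 2 < hi :=
      (PySem.Int.floordiv_lt_iff_lt_mul (by omega)).mpr (by omega)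
    omega

def even_subarray_alt (array : List Int) (k : Int) : List (List Int) :=
  let n : Int := (array.length : Int)
  let pref : List Int :=
    array.foldl (fun pref x => pref ++ [PySem.List.pyGetD pref (-1) 0 + PySem.Int.mod x 2]) [0]
  (PySem.List.pyRange 0 n 1).foldl
    (fun res i =>
      res ++ (PySem.List.pyRange (i + 1) (esBS pref (PySem.List.pyGetD pref i 0 + k) i (n + 1)) 1).map
        (fun m => PySem.List.slice array (some i) (some m)))
    []

-- ===== PRECONDITION & SPEC =====
def Spec_even_subarray (array : List Int) (k : Int) (out : List (List Int)) : Prop := out = even_subarray_alt array k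
instance (array : List Int) (k : Int) (out : List (List Int)) : Decidable (Spec_even_subarray array k out) := by unfold Spec_even_subarray; infer_instance

-- ===== CLAIM (what is proved, stated in full; the proofs are below) =====
def Claim_equal_even_subarray : Prop := ∀ (array : List Int) (k : Int), Dom_even_subarray array k → Spec_even_subarray array k (even_subarray array k)

-- ===== LEMMAS AND PROOFS =====

-- number of odd elements of a list
def ocnt (l : List Int) : Int := (l.countP (fun x => decide (PySem.Int.mod x 2 ≠ 0)) : Int)

-- the slices both programs emit for the start i, with the inner index already advanced to j
def esBlockFrom (array : List Int) (k : Int) (i j : Int) : List (List Int) :=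
  ((PySem.List.pyRange (j + 1) ((array.length : Int) + 1) 1).filter
      (fun m => decide (ocnt (PySem.List.slice array (some i) (some m)) ≤ k))).map
    (fun m => PySem.List.slice array (some i) (some m))

-- A's inner loop body, named for the lemmas (definitionally the lambda inside `even_subarray`)
def stepA (array : List Int) (k i : Int) (st : List (List Int) × Int) (j : Int) : List (List Int) × Int :=
  let odd : Int := if PySem.Int.mod (PySem.List.pyGetD array j 0) 2 ≠ 0 then st.2 + 1 else st.2
  (if odd ≤ k then st.1 ++ [PySem.List.slice array (some i) (some (j + 1))] else st.1, odd)

theorem ocnt_append (l₁ l₂ : List Int) : ocnt (l₁ ++ l₂) = ocnt l₁ + ocnt l₂ := by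
  simp [ocnt, List.countP_append]

theorem ocnt_singleton (x : Int) : ocnt [x] = PySem.Int.mod x 2 := by
  have h2 : x % 2 = 0 ∨ x % 2 = 1 := by omega
  unfold ocnt
  rcases h2 with h | h <;> simp [h]

theorem ocnt_take_mono (l : List Int) {i j : Nat} (h : i ≤ j) : ocnt (l.take i) ≤ ocnt (l.take j) := by
  have hs : (l.take i).Sublist (l.take j) := by
    rw [show i = min i j by omega, ← List.take_take]
    exact List.take_sublist _ _
  unfold ocnt
  exact_mod_cast hs.countP_le

theorem ocnt_slice (array : List Int) (i m : Nat) (him : i ≤ m) :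
    ocnt (PySem.List.slice array (some (i:Int)) (some (m:Int)))
      = ocnt (array.take m) - ocnt (array.take i) := by
  rw [PySem.List.slice_natCast]
  have h : array.take m = array.take i ++ (array.drop i).take (m - i) := by
    conv_lhs => rw [show m = i + (m - i) by omega]
    exact List.take_add
  rw [h, ocnt_append]
  ring

theorem pref_eq (array : List Int) :
    array.foldl (fun pref x => pref ++ [PySem.List.pyGetD pref (-1) 0 + PySem.Int.mod x 2]) [0]
      = (List.range (array.length + 1)).map (fun t => ocnt (array.take t)) := by
  induction array using List.reverseRecOn with
  | nil => simp [ocnt]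
  | append_singleton ar x ih =>
    rw [List.foldl_append, List.foldl_cons, List.foldl_nil, ih]
    have hlast : PySem.List.pyGetD ((List.range (ar.length + 1)).map (fun t => ocnt (ar.take t))) (-1) 0
        = ocnt ar := by
      rw [List.range_succ, List.map_append, List.map_cons, List.map_nil,
        PySem.List.pyGetD_neg_one_append_singleton, List.take_length]
    have hR : (List.range ((ar ++ [x]).length + 1)).map (fun t => ocnt ((ar ++ [x]).take t))
        = (List.range (ar.length + 1)).map (fun t => ocnt (ar.take t))
          ++ [ocnt ar + PySem.Int.mod x 2] := by
      rw [show (ar ++ [x]).length + 1 = (ar.length + 1) + 1 by simp, List.range_succ,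
        List.map_append]
      congr 1
      · apply List.map_congr_left
        intro t ht
        have htl : t < ar.length + 1 := List.mem_range.1 ht
        rw [List.take_append_of_le_length (by omega)]
      · simp only [List.map_cons, List.map_nil]
        have htk : (ar ++ [x]).take (ar.length + 1) = ar ++ [x] :=
          List.take_of_length_le (by simp)
        rw [htk, ocnt_append, ocnt_singleton]
    rw [hlast, hR]

theorem pref_get (array : List Int) : ∀ (u : Int), 0 ≤ u → u ≤ (array.length : Int) →
    PySem.List.pyGetD ((List.range (array.length + 1)).map (fun t => ocnt (array.take t))) u 0
      = ocnt (array.take u.toNat) := by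
  intro u h0 h1
  rw [PySem.List.pyGetD_of_nonneg _ _ h0]
  exact PySem.List.getD_map_range _ _ _ _ (by omega)

theorem esBS_spec (pref : List Int) (target : Int) :
    ∀ (fuel : Nat) (lo hi : Int), (hi - lo).toNat ≤ fuel → lo ≤ hi →
    (∀ u v : Int, lo ≤ u → u ≤ v → v < hi →
      PySem.List.pyGetD pref u 0 ≤ PySem.List.pyGetD pref v 0) →
    lo ≤ esBS pref target lo hi ∧ esBS pref target lo hi ≤ hi ∧
    (∀ u, lo ≤ u → u < esBS pref target lo hi → PySem.List.pyGetD pref u 0 ≤ target) ∧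
    (∀ u, esBS pref target lo hi ≤ u → u < hi → ¬ PySem.List.pyGetD pref u 0 ≤ target) := by
  intro fuel
  induction fuel with
  | zero =>
    intro lo hi hf hlh Hm
    have he : hi = lo := by omega
    subst he
    rw [show esBS pref target hi hi = hi from by rw [esBS.eq_def]; simp]
    exact ⟨le_refl _, le_refl _, fun u h1 h2 => absurd h1 (by omega),
      fun u h1 h2 => absurd h1 (by omega)⟩
  | succ fuel ih =>
    intro lo hi hf hlh Hm
    by_cases h : lo < hi
    · have hb := PySem.Int.floordiv_two_mid_bounds (le_of_lt h)
      have hlt : PySem.Int.floordiv (lo + hi) 2 < hi :=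
        (PySem.Int.floordiv_lt_iff_lt_mul (by omega)).mpr (by omega)
      rw [esBS.eq_def, dif_pos h]
      by_cases hc : PySem.List.pyGetD pref (PySem.Int.floordiv (lo + hi) 2) 0 ≤ target
      · rw [if_pos hc]
        obtain ⟨h1, h2, h3, h4⟩ :=
          ih (PySem.Int.floordiv (lo + hi) 2 + 1) hi (by omega) (by omega)
            (fun u v hu huv hv => Hm u v (by omega) huv hv)
        refine ⟨by omega, h2, ?_, h4⟩
        intro u hu hut
        by_cases hum : PySem.Int.floordiv (lo + hi) 2 + 1 ≤ u
        · exact h3 u hum hut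
        · exact le_trans (Hm u (PySem.Int.floordiv (lo + hi) 2) hu (by omega) hlt) hc
      · rw [if_neg hc]
        obtain ⟨h1, h2, h3, h4⟩ :=
          ih lo (PySem.Int.floordiv (lo + hi) 2) (by omega) (by omega)
            (fun u v hu huv hv => Hm u v hu huv (by omega))
        refine ⟨h1, by omega, h3, ?_⟩
        intro u hu huh
        by_cases hum : u < PySem.Int.floordiv (lo + hi) 2
        · exact h4 u hu hum
        · intro hle
          exact hc (le_trans (Hm (PySem.Int.floordiv (lo + hi) 2) u (by omega) (by omega) huh) hle)
    · rw [esBS.eq_def, dif_neg h]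
      exact ⟨le_refl _, hlh, fun u h1 h2 => absurd h1 (by omega),
        fun u h1 h2 => absurd h1 (by omega)⟩

theorem filter_pyRange_eq (p : Int → Bool) (a b t : Int) (htb : t ≤ b)
    (hT : ∀ m, a ≤ m → m < t → p m = true)
    (hF : ∀ m, t ≤ m → m < b → p m = false) :
    (PySem.List.pyRange a b 1).filter p = PySem.List.pyRange a t 1 := by
  by_cases hat : a ≤ t
  · rw [PySem.List.pyRange_one_append a t b hat htb, List.filter_append,
      List.filter_eq_self.2 (fun m hm =>
        hT m (PySem.List.mem_pyRange_one.1 hm).1 (PySem.List.mem_pyRange_one.1 hm).2),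
      List.filter_eq_nil_iff.2 (fun m hm => by
        simp [hF m (PySem.List.mem_pyRange_one.1 hm).1 (PySem.List.mem_pyRange_one.1 hm).2]),
      List.append_nil]
  · rw [PySem.List.pyRange_one_eq_nil (by omega : t ≤ a)]
    exact List.filter_eq_nil_iff.2 (fun m hm => by
      have hmm := PySem.List.mem_pyRange_one.1 hm
      simp [hF m (by omega) hmm.2])

theorem esBlockFrom_cons (array : List Int) (k : Int) (i j : Nat) (hj : j < array.length) :
    esBlockFrom array k (i:Int) (j:Int)
      = (if ocnt ((array.drop i).take (j + 1 - i)) ≤ k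
          then [PySem.List.slice array (some (i:Int)) (some ((j:Int) + 1))] else [])
        ++ esBlockFrom array k (i:Int) ((j:Int) + 1) := by
  unfold esBlockFrom
  have h1 : ((j:Int) + 1) < (array.length : Int) + 1 := by omega
  rw [PySem.List.pyRange_one_cons h1, List.filter_cons]
  have hsl : PySem.List.slice array (some (i:Int)) (some ((j:Int) + 1))
      = (array.drop i).take (j + 1 - i) := by
    rw [show ((j:Int) + 1) = ((j + 1 : Nat) : Int) by push_cast; ring]
    exact PySem.List.slice_natCast array i (j + 1)
  by_cases hC : ocnt ((array.drop i).take (j + 1 - i)) ≤ k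
  · simp [hsl, hC]
  · simp [hsl, hC]

theorem innerA_spec (array : List Int) (k : Int) (i : Nat) :
    ∀ (d j : Nat), j + d = array.length → i ≤ j →
    ∀ (res : List (List Int)) (odd : Int), odd = ocnt ((array.drop i).take (j - i)) →
    ((PySem.List.pyRange (j:Int) (array.length : Int) 1).foldl (stepA array k (i:Int)) (res, odd)).1
      = res ++ esBlockFrom array k (i:Int) (j:Int) := by
  intro d
  induction d with
  | zero =>
    intro j hd hij res odd hodd
    have hL : j = array.length := by omega
    subst hL
    rw [PySem.List.pyRange_one_eq_nil (le_refl _), List.foldl_nil]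
    unfold esBlockFrom
    rw [PySem.List.pyRange_one_eq_nil (le_refl _)]
    simp
  | succ d ih =>
    intro j hd hij res odd hodd
    have hjlt : j < array.length := by omega
    have hjc : (j:Int) < (array.length : Int) := by exact_mod_cast hjlt
    rw [PySem.List.pyRange_one_cons hjc, List.foldl_cons]
    have hget : PySem.List.pyGetD array (j:Int) 0 = array[j] := by
      rw [PySem.List.pyGetD_natCast]
      simp [List.getD_eq_getElem?_getD, List.getElem?_eq_getElem hjlt]
    have htake : (array.drop i).take (j + 1 - i) = (array.drop i).take (j - i) ++ [array[j]] := by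
      rw [show j + 1 - i = (j - i) + 1 by omega, List.take_add_one]
      congr 1
      rw [List.getElem?_drop, show i + (j - i) = j by omega, List.getElem?_eq_getElem hjlt]
      rfl
    have hocnt1 : ocnt ((array.drop i).take (j + 1 - i))
        = if PySem.Int.mod (array[j]) 2 ≠ 0 then odd + 1 else odd := by
      rw [htake, ocnt_append, ocnt_singleton, ← hodd]
      have h2 : array[j] % 2 = 0 ∨ array[j] % 2 = 1 := by omega
      rcases h2 with h | h <;> simp [h]
    have happ : stepA array k (i:Int) (res, odd) (j:Int)
        = (if ocnt ((array.drop i).take (j + 1 - i)) ≤ k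
             then res ++ [PySem.List.slice array (some (i:Int)) (some ((j:Int) + 1))] else res,
           ocnt ((array.drop i).take (j + 1 - i))) := by
      rw [hocnt1]
      simp only [stepA, hget]
    have IH' := ih (j + 1) (by omega) (by omega)
      (if ocnt ((array.drop i).take (j + 1 - i)) ≤ k
        then res ++ [PySem.List.slice array (some (i:Int)) (some ((j:Int) + 1))] else res)
      (ocnt ((array.drop i).take (j + 1 - i))) rfl
    rw [show (((j + 1 : Nat)) : Int) = ((j:Int) + 1) by push_cast; ring] at IH'
    rw [happ, IH', esBlockFrom_cons array k i j hjlt]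
    by_cases hC : ocnt ((array.drop i).take (j + 1 - i)) ≤ k <;> simp [hC]

theorem blockB_spec (array : List Int) (k : Int) (i : Nat) (hi : i < array.length) :
    (PySem.List.pyRange ((i:Int) + 1)
      (esBS ((List.range (array.length + 1)).map (fun t => ocnt (array.take t)))
        (PySem.List.pyGetD ((List.range (array.length + 1)).map (fun t => ocnt (array.take t))) (i:Int) 0 + k)
        (i:Int) ((array.length : Int) + 1)) 1).map
      (fun m => PySem.List.slice array (some (i:Int)) (some m))
    = esBlockFrom array k (i:Int) (i:Int) := by
  obtain ⟨h1, h2, h3, h4⟩ :=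
    esBS_spec ((List.range (array.length + 1)).map (fun t => ocnt (array.take t)))
      (PySem.List.pyGetD ((List.range (array.length + 1)).map (fun t => ocnt (array.take t))) (i:Int) 0 + k)
      (((array.length : Int) + 1) - (i:Int)).toNat (i:Int) ((array.length : Int) + 1)
      (le_refl _) (by omega)
      (fun u v hu huv hv => by
        rw [pref_get array u (by omega) (by omega), pref_get array v (by omega) (by omega)]
        exact ocnt_take_mono array (by omega))
  unfold esBlockFrom
  rw [filter_pyRange_eq _ ((i:Int) + 1) ((array.length : Int) + 1) _ h2
    (fun m hm1 hmt => by
      have h0m : (0:Int) ≤ m := by omega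
      have h5 := h3 m (by omega) hmt
      rw [pref_get array m h0m (by omega),
        pref_get array (i:Int) (by omega) (by omega)] at h5
      obtain ⟨mN, rfl⟩ : ∃ mN : Nat, m = (mN:Int) := ⟨m.toNat, (Int.toNat_of_nonneg h0m).symm⟩
      simp only [Int.toNat_natCast] at h5
      simp only [decide_eq_true_eq]
      rw [ocnt_slice array i mN (by omega)]
      omega)
    (fun m htm hmb => by
      have h0m : (0:Int) ≤ m := by omega
      have h5 := h4 m htm hmb
      rw [pref_get array m h0m (by omega),
        pref_get array (i:Int) (by omega) (by omega)] at h5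
      obtain ⟨mN, rfl⟩ : ∃ mN : Nat, m = (mN:Int) := ⟨m.toNat, (Int.toNat_of_nonneg h0m).symm⟩
      simp only [Int.toNat_natCast] at h5
      simp only [decide_eq_false_iff_not]
      rw [ocnt_slice array i mN (by omega)]
      omega)]

theorem even_subarray_spec' (array : List Int) (k : Int) :
    even_subarray array k = even_subarray_alt array k := by
  simp only [even_subarray, even_subarray_alt]
  rw [pref_eq]
  refine Eq.trans
    (PySem.List.foldl_congr_mem _ _ (fun res i => res ++ esBlockFrom array k i i) _ ?_)
    (Eq.symm (PySem.List.foldl_congr_mem _ _ (fun res i => res ++ esBlockFrom array k i i) _ ?_))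
  · intro acc i him
    obtain ⟨h0, hL⟩ := PySem.List.mem_pyRange_one.1 him
    obtain ⟨iN, rfl⟩ : ∃ iN : Nat, i = (iN:Int) := ⟨i.toNat, (Int.toNat_of_nonneg h0).symm⟩
    exact innerA_spec array k iN (array.length - iN) iN
      (by omega) (le_refl _) acc 0 (by simp [ocnt])
  · intro acc i him
    obtain ⟨h0, hL⟩ := PySem.List.mem_pyRange_one.1 him
    obtain ⟨iN, rfl⟩ : ∃ iN : Nat, i = (iN:Int) := ⟨i.toNat, (Int.toNat_of_nonneg h0).symm⟩
    have hiN : iN < array.length := by exact_mod_cast hL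
    exact congrArg (fun l => acc ++ l) (blockB_spec array k iN hiN)

-- ===== VERDICT (by name: the statement is the Claim_ definition above) =====
theorem even_subarray_spec : Claim_equal_even_subarray := by
  intro array k _
  unfold Spec_even_subarray
  exact even_subarray_spec' array k
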